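-- pv_equiv track=rewrite | github.com/Josesosa0777/Pytch | aebs/src/aebs/fill/fillFLC25_TSR_SHORTLISTED.py | get_traffic_data
-- ===== SOURCE A (Python) =====
-- def get_traffic_data(traffic_sign_id, traffic_sign_data_for_table):
--     traffic_data = {}
--     sign_class = []
--     sign_picture = []
--     sign_value = []
--     sign_status = []
--     missing_sign_ids = []
--     for item in traffic_sign_id:
--         if str(item) in traffic_sign_data_for_table:
--             sign_class.append(traffic_sign_data_for_table.get(str(item), item)[1])
--             sign_picture.append(traffic_sign_data_for_table.get(str(item), item)[0])
--             sign_value.append(traffic_sign_data_for_table.get(str(item), item)[2])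
--             sign_status.append(traffic_sign_data_for_table.get(str(item), item)[3])
--         else:
--             missing_sign_ids.append(item)
--             # sign_icon_path, sign_class, value, active_status = "", "", "Not Applicable", "Inactive"
--             sign_class.append("Missing Data")
--             sign_picture.append("Missing Data")
--             sign_value.append("Missing Data")
--             sign_status.append("Missing Data")
--     return sign_class, sign_value, sign_picture, sign_status, missing_sign_ids
-- ===== SOURCE B (Python) =====
-- def get_traffic_data(traffic_sign_id, traffic_sign_data_for_table):
--     def column(k):
--         return [traffic_sign_data_for_table[str(i)][k]
--                 if str(i) in traffic_sign_data_for_table else "Missing Data"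
--                 for i in traffic_sign_id]
--     missing_sign_ids = [i for i in traffic_sign_id
--                         if str(i) not in traffic_sign_data_for_table]
--     return column(1), column(2), column(0), column(3), missing_sign_ids
-- ===== Notes on version B (the rewrite author's own statement) =====
-- stated objective: simpler
-- what changed: B replaces A's single loop that mutates five parallel accumulators with staged passes: a column helper mapped over the ids once per output column (indices 1,2,0,3) plus one filter pass for missing ids, with no shared loop state.
import Mathlib
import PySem

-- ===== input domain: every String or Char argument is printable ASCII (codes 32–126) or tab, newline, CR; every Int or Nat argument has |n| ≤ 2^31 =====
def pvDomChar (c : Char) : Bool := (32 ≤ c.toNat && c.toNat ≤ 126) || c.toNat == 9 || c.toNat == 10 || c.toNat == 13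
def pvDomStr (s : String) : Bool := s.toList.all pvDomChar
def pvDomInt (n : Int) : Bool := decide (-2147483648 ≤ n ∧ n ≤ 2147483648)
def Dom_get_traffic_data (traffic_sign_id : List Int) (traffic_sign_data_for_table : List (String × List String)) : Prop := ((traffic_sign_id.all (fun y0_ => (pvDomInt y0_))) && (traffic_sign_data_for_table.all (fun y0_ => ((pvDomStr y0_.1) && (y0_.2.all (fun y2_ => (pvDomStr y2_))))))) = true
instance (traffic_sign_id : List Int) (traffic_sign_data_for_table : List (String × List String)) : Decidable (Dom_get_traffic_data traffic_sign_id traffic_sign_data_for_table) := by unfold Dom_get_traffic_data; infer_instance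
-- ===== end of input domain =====

-- B replaces A's single loop with five mutating parallel accumulators by staged passes: a column helper
-- mapped over the ids once per output column plus one filter pass for missing ids (objective: simpler).


-- ===== PORT A =====
-- A: one loop over the ids, five parallel accumulators, four repeated dict lookups per present id.
-- row[i] is ported as (PySem.List.pyGet? row i).getD "" — exact under Pre_ (present rows have ≥ 4 entries;
-- shorter rows make Python A raise IndexError and are excluded by Pre_).
def get_traffic_data (traffic_sign_id : List Int) (traffic_sign_data_for_table : List (String × List String)) : List String × List String × List String × List String × List Int :=
  let d := PySem.Dict.mk traffic_sign_data_for_table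
  let st := traffic_sign_id.foldl (fun (acc : List String × List String × List String × List String × List Int) item =>
    let (sc, sp, sv, ss, mi) := acc
    if (d.get? (PySem.Int.toStr item)).isSome then
      (sc ++ [(PySem.List.pyGet? (d.getD (PySem.Int.toStr item) []) 1).getD ""],
       sp ++ [(PySem.List.pyGet? (d.getD (PySem.Int.toStr item) []) 0).getD ""],
       sv ++ [(PySem.List.pyGet? (d.getD (PySem.Int.toStr item) []) 2).getD ""],
       ss ++ [(PySem.List.pyGet? (d.getD (PySem.Int.toStr item) []) 3).getD ""],
       mi)
    else
      (sc ++ ["Missing Data"], sp ++ ["Missing Data"], sv ++ ["Missing Data"], ss ++ ["Missing Data"], mi ++ [item]))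
    ([], [], [], [], [])
  (st.1, st.2.2.1, st.2.1, st.2.2.2.1, st.2.2.2.2)

-- ===== PORT B =====
-- B: a column helper mapped over the ids once per output column, plus a filter pass for the missing ids.
-- row[k] ported as (PySem.List.pyGet? row k).getD "" — exact under Pre_ (present rows have ≥ 4 entries).
def get_traffic_data_alt (traffic_sign_id : List Int) (traffic_sign_data_for_table : List (String × List String)) : List String × List String × List String × List String × List Int :=
  let d := PySem.Dict.mk traffic_sign_data_for_table
  let column := fun (k : Int) => traffic_sign_id.map (fun i =>
    match d.get? (PySem.Int.toStr i) with
    | some row => (PySem.List.pyGet? row k).getD ""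
    | none => "Missing Data")
  let missing_sign_ids := traffic_sign_id.filter (fun i => (d.get? (PySem.Int.toStr i)).isNone)
  (column 1, column 2, column 0, column 3, missing_sign_ids)

-- ===== PRECONDITION & SPEC =====
-- Pre_ excludes exactly the inputs where Python A raises IndexError: an id whose (first-match) table row has
-- fewer than 4 entries.
def Pre_get_traffic_data (traffic_sign_id : List Int) (traffic_sign_data_for_table : List (String × List String)) : Prop :=
  ∀ item ∈ traffic_sign_id, 4 ≤ (((PySem.Dict.mk traffic_sign_data_for_table).getD (PySem.Int.toStr item) ["", "", "", ""]).length)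
instance (traffic_sign_id : List Int) (traffic_sign_data_for_table : List (String × List String)) : Decidable (Pre_get_traffic_data traffic_sign_id traffic_sign_data_for_table) := by unfold Pre_get_traffic_data; infer_instance
def pvWitness_get_traffic_data : List Int × (List (String × List String)) := ([1, 2], [("1", ["p", "c", "v", "s"])])

def Spec_get_traffic_data (traffic_sign_id : List Int) (traffic_sign_data_for_table : List (String × List String)) (out : List String × List String × List String × List String × List Int) : Prop := out = get_traffic_data_alt traffic_sign_id traffic_sign_data_for_table
instance (traffic_sign_id : List Int) (traffic_sign_data_for_table : List (String × List String)) (out : List String × List String × List String × List String × List Int) : Decidable (Spec_get_traffic_data traffic_sign_id traffic_sign_data_for_table out) := by unfold Spec_get_traffic_data; infer_instance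

-- ===== CLAIM (what is proved, stated in full; the proofs are below) =====
def Claim_equal_get_traffic_data : Prop := ∀ (traffic_sign_id : List Int) (traffic_sign_data_for_table : List (String × List String)), Dom_get_traffic_data traffic_sign_id traffic_sign_data_for_table → Pre_get_traffic_data traffic_sign_id traffic_sign_data_for_table → Spec_get_traffic_data traffic_sign_id traffic_sign_data_for_table (get_traffic_data traffic_sign_id traffic_sign_data_for_table)

-- ===== LEMMAS AND PROOFS =====

-- Value appended by A for column k at one id.
def pvCol (d : PySem.Dict String (List String)) (k : Int) (i : Int) : String :=
  match d.get? (PySem.Int.toStr i) with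
  | some row => (PySem.List.pyGet? row k).getD ""
  | none => "Missing Data"

def pvMiss (d : PySem.Dict String (List String)) (item : Int) : Bool := (d.get? (PySem.Int.toStr item)).isNone

-- Closed form of A's loop: each accumulator is its column map, the misses are the filter.
lemma pvA_loop (d : PySem.Dict String (List String)) (ids : List Int)
    (sc sp sv ss : List String) (mi : List Int) :
    ids.foldl (fun (acc : List String × List String × List String × List String × List Int) item =>
      let (sc, sp, sv, ss, mi) := acc
      if (d.get? (PySem.Int.toStr item)).isSome then
        (sc ++ [(PySem.List.pyGet? (d.getD (PySem.Int.toStr item) []) 1).getD ""],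
         sp ++ [(PySem.List.pyGet? (d.getD (PySem.Int.toStr item) []) 0).getD ""],
         sv ++ [(PySem.List.pyGet? (d.getD (PySem.Int.toStr item) []) 2).getD ""],
         ss ++ [(PySem.List.pyGet? (d.getD (PySem.Int.toStr item) []) 3).getD ""],
         mi)
      else
        (sc ++ ["Missing Data"], sp ++ ["Missing Data"], sv ++ ["Missing Data"], ss ++ ["Missing Data"], mi ++ [item]))
      (sc, sp, sv, ss, mi)
    = (sc ++ ids.map (pvCol d 1),
       sp ++ ids.map (pvCol d 0),
       sv ++ ids.map (pvCol d 2),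
       ss ++ ids.map (pvCol d 3),
       mi ++ ids.filter (pvMiss d)) := by
  induction ids generalizing sc sp sv ss mi with
  | nil => simp
  | cons x xs ih =>
    simp only [List.foldl_cons, List.map_cons, List.filter_cons]
    cases h : d.get? (PySem.Int.toStr x) with
    | none =>
      simp only [Option.isSome_none, Bool.false_eq_true, if_false, ih, pvCol, pvMiss, h,
        Option.isNone_none, if_true]
      simp
    | some row =>
      have hg : d.getD (PySem.Int.toStr x) [] = row := by simp [PySem.Dict.getD_eq_get?_getD, h]
      simp only [Option.isSome_some, if_true, ih, pvCol, pvMiss, h, hg,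
        Option.isNone_some, Bool.false_eq_true, if_false]
      simp

-- ===== VERDICT (by name: the statement is the Claim_ definition above) =====
theorem get_traffic_data_spec : Claim_equal_get_traffic_data := by
  intro ids table _ _
  unfold Spec_get_traffic_data get_traffic_data get_traffic_data_alt
  simp only [pvA_loop]
  rfl
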